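-- pv_equiv track=rewrite | github.com/thiagopelizoni/ProjectEuler | src/problem_176.py | odd_divisors_up_to
-- ===== SOURCE A (Python) =====
-- import math
--
-- def odd_divisors_up_to(number, limit_value):
--     upper_limit = math.isqrt(number)
--     divisors = set()
--     for small_divisor in range(1, upper_limit + 1):
--         if number % small_divisor == 0:
--             large_divisor = number // small_divisor
--             if small_divisor % 2 == 1 and 3 <= small_divisor <= limit_value:
--                 divisors.add(small_divisor)
--             if large_divisor % 2 == 1 and 3 <= large_divisor <= limit_value:
--                 divisors.add(large_divisor)
--     return sorted(divisors)
-- ===== SOURCE B (Python) =====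
-- import math
--
-- def odd_divisors_up_to(number, limit_value):
--     root = math.isqrt(number)
--     small = [d for d in range(3, root + 1, 2)
--              if number % d == 0 and d <= limit_value]
--     large = [number // s for s in reversed(range(1, root + 1))
--              if number % s == 0 and s * s != number
--              and (number // s) % 2 == 1 and 3 <= number // s <= limit_value]
--     return small + large
-- ===== Notes on version B (the rewrite author's own statement) =====
-- stated objective: alternative
-- what changed: A collects both members of each divisor pair into a set and sorts it at the end; B builds the answer already in ascending order with no set and no sort: an ascending step-2 scan collects the odd small divisors up to isqrt(number), and a reversed scan over the cofactors appends the large odd divisors in increasing order.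
import Mathlib
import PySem

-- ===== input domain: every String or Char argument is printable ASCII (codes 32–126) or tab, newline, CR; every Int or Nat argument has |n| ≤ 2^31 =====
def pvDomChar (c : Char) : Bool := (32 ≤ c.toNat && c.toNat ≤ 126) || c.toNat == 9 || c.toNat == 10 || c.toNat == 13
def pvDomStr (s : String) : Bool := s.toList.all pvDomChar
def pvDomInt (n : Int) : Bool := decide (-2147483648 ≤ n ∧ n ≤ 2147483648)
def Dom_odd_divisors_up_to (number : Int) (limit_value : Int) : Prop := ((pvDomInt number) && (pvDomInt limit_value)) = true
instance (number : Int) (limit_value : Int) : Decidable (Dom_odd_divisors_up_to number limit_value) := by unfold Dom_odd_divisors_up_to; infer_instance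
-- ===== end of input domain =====

-- B builds the answer already in ascending order — odd small divisors by an ascending step-2 scan up
-- to isqrt(number), then the large cofactors from a reversed scan — so it needs no set and no sort.

-- ===== PORT A =====
-- math.isqrt(number): exact for 0 ≤ number (guaranteed by Pre_); Python raises ValueError on negative input.
def pyIsqrt (n : Int) : Int := (Nat.sqrt n.toNat : Int)

-- the body of A's for-loop (divisors is the running set)
def stepA (number limit_value : Int) (divisors : PySem.Set Int) (small_divisor : Int) : PySem.Set Int :=
  if PySem.Int.mod number small_divisor == 0 then
    let large_divisor := PySem.Int.floordiv number small_divisor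
    let divisors :=
      if PySem.Int.mod small_divisor 2 == 1 && decide (3 ≤ small_divisor) && decide (small_divisor ≤ limit_value)
      then PySem.Set.add divisors small_divisor else divisors
    if PySem.Int.mod large_divisor 2 == 1 && decide (3 ≤ large_divisor) && decide (large_divisor ≤ limit_value)
    then PySem.Set.add divisors large_divisor else divisors
  else divisors

def odd_divisors_up_to (number : Int) (limit_value : Int) : List Int :=
  let upper_limit := pyIsqrt number
  let divisors : PySem.Set Int :=
    (PySem.List.pyRange 1 (upper_limit + 1)).foldl (stepA number limit_value) PySem.Set.empty
  PySem.List.sorted divisors (fun x => x) false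

-- ===== PORT B =====
-- [d for d in range(3, root+1, 2) if number % d == 0 and d <= limit_value]
def smallB (number limit_value root : Int) : List Int :=
  (PySem.List.pyRange 3 (root + 1) 2).filter
    (fun d => PySem.Int.mod number d == 0 && decide (d ≤ limit_value))

-- [number // s for s in reversed(range(1, root+1)) if number % s == 0 and s*s != number
--  and (number // s) % 2 == 1 and 3 <= number // s <= limit_value]
def largeB (number limit_value root : Int) : List Int :=
  ((PySem.List.pyRange 1 (root + 1)).reverse.filter
    (fun s => PySem.Int.mod number s == 0 && decide (s * s ≠ number)
      && PySem.Int.mod (PySem.Int.floordiv number s) 2 == 1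
      && decide (3 ≤ PySem.Int.floordiv number s)
      && decide (PySem.Int.floordiv number s ≤ limit_value))).map
    (fun s => PySem.Int.floordiv number s)

def odd_divisors_up_to_alt (number : Int) (limit_value : Int) : List Int :=
  let root := pyIsqrt number
  smallB number limit_value root ++ largeB number limit_value root

-- ===== PRECONDITION & SPEC =====
-- Pre_ excludes number < 0, on which A raises ValueError (math.isqrt of a negative number).
def Pre_odd_divisors_up_to (number : Int) (limit_value : Int) : Prop := 0 ≤ number
instance (number : Int) (limit_value : Int) : Decidable (Pre_odd_divisors_up_to number limit_value) := by unfold Pre_odd_divisors_up_to; infer_instance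
def pvWitness_odd_divisors_up_to : Int × Int := (45, 100)

def Spec_odd_divisors_up_to (number : Int) (limit_value : Int) (out : List Int) : Prop := out = odd_divisors_up_to_alt number limit_value
instance (number : Int) (limit_value : Int) (out : List Int) : Decidable (Spec_odd_divisors_up_to number limit_value out) := by unfold Spec_odd_divisors_up_to; infer_instance

-- ===== CLAIM (what is proved, stated in full; the proofs are below) =====
def Claim_equal_odd_divisors_up_to : Prop := ∀ (number : Int) (limit_value : Int), Dom_odd_divisors_up_to number limit_value → Pre_odd_divisors_up_to number limit_value → Spec_odd_divisors_up_to number limit_value (odd_divisors_up_to number limit_value)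
-- ===== LEMMAS AND PROOFS =====

-- The boolean guard of A, characterised (y % 2 here is Lean's emod, equal to Python's for divisor 2 > 0).
theorem oddGuard_iff (lim y : Int) :
    (PySem.Int.mod y 2 == 1 && decide (3 ≤ y) && decide (y ≤ lim)) = true ↔
      y % 2 = 1 ∧ 3 ≤ y ∧ y ≤ lim := by
  simp [and_assoc]

theorem nodup_foldl_stepA (n lim : Int) (l : List Int) (s : PySem.Set Int) (hs : s.Nodup) :
    (l.foldl (stepA n lim) s).Nodup := by
  induction l generalizing s with
  | nil => exact hs
  | cons d t ih =>
      refine ih _ ?_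
      simp only [stepA]
      split_ifs <;> first
        | exact hs
        | exact PySem.Set.nodup_add _ _ hs
        | exact PySem.Set.nodup_add _ _ (PySem.Set.nodup_add _ _ hs)

set_option maxHeartbeats 1600000 in
theorem mem_stepA (n lim : Int) (s : PySem.Set Int) (d x : Int) :
    x ∈ stepA n lim s d ↔
      x ∈ s ∨ (d ∣ n ∧
        ((x = d ∧ (d % 2 = 1 ∧ 3 ≤ d ∧ d ≤ lim)) ∨
         (x = PySem.Int.floordiv n d ∧
           (PySem.Int.floordiv n d % 2 = 1 ∧ 3 ≤ PySem.Int.floordiv n d ∧ PySem.Int.floordiv n d ≤ lim)))) := by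
  have g1 := oddGuard_iff lim d
  have g2 := oddGuard_iff lim (PySem.Int.floordiv n d)
  simp only [stepA]
  by_cases hdvd : d ∣ n
  · rw [if_pos (by simpa using (PySem.Int.mod_eq_zero_iff_dvd n d).2 hdvd)]
    by_cases h1 : d % 2 = 1 ∧ 3 ≤ d ∧ d ≤ lim <;>
      by_cases h2 : PySem.Int.floordiv n d % 2 = 1 ∧ 3 ≤ PySem.Int.floordiv n d ∧ PySem.Int.floordiv n d ≤ lim
    · rw [if_pos (g1.2 h1), if_pos (g2.2 h2)]
      simp only [PySem.Set.mem_add]; tauto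
    · rw [if_pos (g1.2 h1), if_neg (fun h => h2 (g2.1 h))]
      simp only [PySem.Set.mem_add]; tauto
    · rw [if_pos (g2.2 h2), if_neg (fun h => h1 (g1.1 h))]
      simp only [PySem.Set.mem_add]; tauto
    · rw [if_neg (fun h => h1 (g1.1 h)), if_neg (fun h => h2 (g2.1 h))]
      tauto
  · rw [if_neg (fun h => hdvd ((PySem.Int.mod_eq_zero_iff_dvd n d).1 (by simpa using h)))]
    tauto

theorem mem_foldl_stepA (n lim : Int) (l : List Int) (s : PySem.Set Int) (x : Int) :
    x ∈ l.foldl (stepA n lim) s ↔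
      x ∈ s ∨ ∃ d ∈ l, d ∣ n ∧
        ((x = d ∧ (d % 2 = 1 ∧ 3 ≤ d ∧ d ≤ lim)) ∨
         (x = PySem.Int.floordiv n d ∧
           (PySem.Int.floordiv n d % 2 = 1 ∧ 3 ≤ PySem.Int.floordiv n d ∧ PySem.Int.floordiv n d ≤ lim))) := by
  induction l generalizing s with
  | nil => simp
  | cons d t ih =>
      rw [List.foldl_cons, ih, mem_stepA]
      simp only [List.mem_cons, or_and_right, exists_or, exists_eq_left]
      rw [or_assoc]

-- the isqrt bracket: for 0 ≤ n, 0 ≤ d,   d ≤ isqrt n ↔ d² ≤ n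
theorem le_pyIsqrt {n d : Int} (hn : 0 ≤ n) (hd : 0 ≤ d) : d ≤ pyIsqrt n ↔ d * d ≤ n := by
  unfold pyIsqrt
  rw [show d = ((d.toNat : Int)) by omega]
  constructor
  · intro h
    have h' : d.toNat ≤ Nat.sqrt n.toNat := by exact_mod_cast h
    have := Nat.le_sqrt.1 h'
    have : (d.toNat * d.toNat : Int) ≤ (n.toNat : Int) := by exact_mod_cast this
    push_cast at this
    omega
  · intro h
    have h' : (d.toNat * d.toNat : Int) ≤ (n.toNat : Int) := by push_cast at h; omega
    have : d.toNat * d.toNat ≤ n.toNat := by exact_mod_cast h'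
    exact_mod_cast Nat.le_sqrt.2 this

-- divisor-pairing: x appears in A's accumulated set iff x is an odd divisor with 3 ≤ x ≤ min limit n
theorem pairing_iff (n lim x : Int) (hn : 0 ≤ n) :
    (∃ d ∈ PySem.List.pyRange 1 (pyIsqrt n + 1), d ∣ n ∧
        ((x = d ∧ (d % 2 = 1 ∧ 3 ≤ d ∧ d ≤ lim)) ∨
         (x = PySem.Int.floordiv n d ∧
           (PySem.Int.floordiv n d % 2 = 1 ∧ 3 ≤ PySem.Int.floordiv n d ∧ PySem.Int.floordiv n d ≤ lim)))) ↔
      (x % 2 = 1 ∧ 3 ≤ x ∧ x ≤ lim ∧ x ≤ n ∧ x ∣ n) := by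
  constructor
  · rintro ⟨d, hdr, hdvd, hcase⟩
    rw [PySem.List.mem_pyRange_one] at hdr
    obtain ⟨hd1, hdlt⟩ := hdr
    have hdsq : d * d ≤ n := (le_pyIsqrt hn (by omega)).1 (by omega)
    have hnpos : 0 < n := lt_of_lt_of_le (by nlinarith) hdsq
    rcases hcase with ⟨rfl, hodd, h3, hlim⟩ | ⟨hx, hodd, h3, hlim⟩
    · exact ⟨hodd, h3, hlim, Int.le_of_dvd hnpos hdvd, hdvd⟩
    · obtain ⟨c, rfl⟩ := hdvd
      have hfd : PySem.Int.floordiv (d * c) d = c := by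
        rw [PySem.Int.floordiv_eq_ediv_of_pos (show (0:Int) < d by omega)]
        exact Int.mul_ediv_cancel_left c (by omega)
      rw [hfd] at hx hodd h3 hlim
      have hcdvd : c ∣ d * c := Dvd.intro_left d rfl
      rw [hx]
      exact ⟨hodd, h3, hlim, Int.le_of_dvd hnpos hcdvd, hcdvd⟩
  · rintro ⟨hodd, h3, hlim, hxn, hdvd⟩
    have hnpos : 0 < n := by omega
    obtain ⟨c, hc⟩ := hdvd
    have hxpos : (0:Int) < x := by omega
    have hcpos : 0 < c := by nlinarith
    by_cases hsq : x * x ≤ n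
    · refine ⟨x, ?_, ⟨c, hc⟩, Or.inl ⟨rfl, hodd, h3, hlim⟩⟩
      rw [PySem.List.mem_pyRange_one]
      have := (le_pyIsqrt hn (by omega)).2 hsq
      omega
    · have hcx : c < x := by nlinarith
      have hdivcx : PySem.Int.floordiv n c = x := by
        rw [hc, PySem.Int.floordiv_eq_ediv_of_pos hcpos, mul_comm,
          Int.mul_ediv_cancel_left x (by omega)]
      refine ⟨c, ?_, Dvd.intro_left x hc.symm, Or.inr ⟨hdivcx.symm, ?_⟩⟩
      · rw [PySem.List.mem_pyRange_one]
        have hcsq : c * c ≤ n := by nlinarith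
        have := (le_pyIsqrt hn hcpos.le).2 hcsq
        omega
      · rw [hdivcx]; exact ⟨hodd, h3, hlim⟩

theorem pyIsqrt_nonneg (n : Int) : 0 ≤ pyIsqrt n := Int.natCast_nonneg _

theorem pyIsqrt_le (n : Int) (hn : 0 ≤ n) : pyIsqrt n ≤ n := by
  have h0 := pyIsqrt_nonneg n
  have hrr : pyIsqrt n * pyIsqrt n ≤ n := (le_pyIsqrt hn h0).1 le_rfl
  nlinarith

theorem small_pairwise (n lim r : Int) : (smallB n lim r).Pairwise (· < ·) := by
  unfold smallB
  refine List.Pairwise.filter _ ?_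
  rw [PySem.List.pyRange_of_pos _ _ (by norm_num : (0:Int) < 2)]
  refine List.Pairwise.map _ (fun a b h => ?_) List.pairwise_lt_range
  omega

theorem small_mem (n lim r x : Int) :
    x ∈ smallB n lim r ↔ (3 ≤ x ∧ x ≤ r ∧ 2 ∣ x - 3 ∧ x ∣ n ∧ x ≤ lim) := by
  unfold smallB
  simp only [List.mem_filter, PySem.List.mem_pyRange_iff_of_pos (by norm_num : (0:Int) < 2),
    Bool.and_eq_true, beq_iff_eq, decide_eq_true_eq, PySem.Int.mod_eq_zero_iff_dvd]
  constructor
  · rintro ⟨⟨h3, hlt, hstep⟩, hdvd, hlim⟩; exact ⟨h3, by omega, hstep, hdvd, hlim⟩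
  · rintro ⟨h3, hle, hstep, hdvd, hlim⟩; exact ⟨⟨h3, by omega, hstep⟩, hdvd, hlim⟩

theorem largeS_mem (n lim r s : Int) :
    s ∈ (PySem.List.pyRange 1 (r + 1)).reverse.filter
        (fun s => PySem.Int.mod n s == 0 && decide (s * s ≠ n)
          && PySem.Int.mod (PySem.Int.floordiv n s) 2 == 1
          && decide (3 ≤ PySem.Int.floordiv n s)
          && decide (PySem.Int.floordiv n s ≤ lim)) ↔
      (1 ≤ s ∧ s ≤ r ∧ s ∣ n ∧ s * s ≠ n ∧
        PySem.Int.floordiv n s % 2 = 1 ∧ 3 ≤ PySem.Int.floordiv n s ∧ PySem.Int.floordiv n s ≤ lim) := by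
  simp only [List.mem_filter, List.mem_reverse, PySem.List.mem_pyRange_one,
    Bool.and_eq_true, beq_iff_eq, decide_eq_true_eq, PySem.Int.mod_eq_zero_iff_dvd, and_assoc]
  constructor
  · rintro ⟨h1, hlt, hdvd, hne, hodd, h3, hlim⟩
    exact ⟨h1, by omega, hdvd, hne, by simpa using hodd, h3, hlim⟩
  · rintro ⟨h1, hle, hdvd, hne, hodd, h3, hlim⟩
    exact ⟨h1, by omega, hdvd, hne, by simpa using hodd, h3, hlim⟩

theorem mem_large_iff (n lim x : Int) (hn : 0 ≤ n) :
    x ∈ largeB n lim (pyIsqrt n) ↔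
      (x % 2 = 1 ∧ 3 ≤ x ∧ x ≤ lim ∧ pyIsqrt n < x ∧ x ≤ n ∧ x ∣ n) := by
  unfold largeB
  rw [List.mem_map]
  constructor
  · rintro ⟨s, hs, rfl⟩
    rw [largeS_mem] at hs
    obtain ⟨h1, hr, hdvd, hne, hodd, h3, hlim⟩ := hs
    have hss : s * s ≤ n := (le_pyIsqrt hn (by omega)).1 hr
    have hsslt : s * s < n := lt_of_le_of_ne hss hne
    have hnpos : 0 < n := by nlinarith
    obtain ⟨c, rfl⟩ := hdvd
    have hfd : PySem.Int.floordiv (s * c) s = c := by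
      rw [PySem.Int.floordiv_eq_ediv_of_pos (show (0:Int) < s by omega)]
      exact Int.mul_ediv_cancel_left c (by omega)
    rw [hfd] at hodd h3 hlim ⊢
    have hcpos : 0 < c := by nlinarith
    have hslt : s < c := by nlinarith
    have hcr : pyIsqrt (s * c) < c := by
      by_contra hcon
      push_neg at hcon
      have hcc : c * c ≤ s * c := (le_pyIsqrt hn (by omega)).1 hcon
      nlinarith
    exact ⟨hodd, h3, hlim, hcr, Int.le_of_dvd hnpos (Dvd.intro_left s rfl), Dvd.intro_left s rfl⟩
  · rintro ⟨hodd, h3, hlim, hrx, hxn, hdvd⟩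
    have hnpos : 0 < n := by omega
    obtain ⟨c, hc⟩ := hdvd
    have hxpos : (0:Int) < x := by omega
    have hcpos : 0 < c := by nlinarith
    have hxx : n < x * x := by
      by_contra h
      push_neg at h
      have := (le_pyIsqrt hn (by omega)).2 h
      omega
    have hcx : c < x := by nlinarith
    have hccn : c * c < n := by nlinarith
    have hcr : c ≤ pyIsqrt n := (le_pyIsqrt hn (by omega)).2 (le_of_lt hccn)
    have hfd : PySem.Int.floordiv n c = x := by
      rw [hc, mul_comm, PySem.Int.floordiv_eq_ediv_of_pos hcpos]
      exact Int.mul_ediv_cancel_left x (by omega)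
    refine ⟨c, ?_, hfd⟩
    rw [largeS_mem]
    refine ⟨by omega, hcr, ⟨x, by linarith [hc]⟩, ne_of_lt hccn, ?_, ?_, ?_⟩ <;> rw [hfd]
    · exact hodd
    · exact h3
    · exact hlim

theorem large_pairwise (n lim : Int) (hn : 0 ≤ n) :
    (largeB n lim (pyIsqrt n)).Pairwise (· < ·) := by
  unfold largeB
  rw [List.pairwise_map]
  have hbase : (PySem.List.pyRange 1 (pyIsqrt n + 1)).Pairwise (· < ·) := by
    rw [PySem.List.pyRange_of_pos _ _ (by norm_num : (0:Int) < 1)]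
    refine List.Pairwise.map _ (fun a b h => ?_) List.pairwise_lt_range
    omega
  have hrev : ((PySem.List.pyRange 1 (pyIsqrt n + 1)).reverse).Pairwise (· > ·) := by
    rw [List.pairwise_reverse]
    exact hbase
  refine List.Pairwise.imp_of_mem ?_ (List.Pairwise.filter _ hrev)
  intro a b ha hb hab
  have ha' := (largeS_mem n lim (pyIsqrt n) a).1 ha
  have hb' := (largeS_mem n lim (pyIsqrt n) b).1 hb
  obtain ⟨ha1, har, hadvd, -, -, -, -⟩ := ha'
  obtain ⟨hb1, hbr, hbdvd, -, -, -, -⟩ := hb'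
  have haa : a * a ≤ n := (le_pyIsqrt hn (by omega)).1 har
  have hnpos : 0 < n := by nlinarith
  obtain ⟨ca, hca⟩ := hadvd
  obtain ⟨cb, hcb⟩ := hbdvd
  have hfa : PySem.Int.floordiv n a = ca := by
    rw [hca, PySem.Int.floordiv_eq_ediv_of_pos (show (0:Int) < a by omega)]
    exact Int.mul_ediv_cancel_left ca (by omega)
  have hfb : PySem.Int.floordiv n b = cb := by
    rw [hcb, PySem.Int.floordiv_eq_ediv_of_pos (show (0:Int) < b by omega)]
    exact Int.mul_ediv_cancel_left cb (by omega)
  rw [hfa, hfb]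
  have hcapos : 0 < ca := by nlinarith
  have hcbpos : 0 < cb := by nlinarith
  nlinarith [hab]

theorem mem_alt_iff (n lim x : Int) (hn : 0 ≤ n) :
    x ∈ odd_divisors_up_to_alt n lim ↔ (x % 2 = 1 ∧ 3 ≤ x ∧ x ≤ lim ∧ x ≤ n ∧ x ∣ n) := by
  simp only [odd_divisors_up_to_alt]
  rw [List.mem_append, small_mem, mem_large_iff _ _ _ hn]
  have hrn := pyIsqrt_le n hn
  constructor
  · rintro (⟨h3, hr, hstep, hdvd, hlim⟩ | ⟨hodd, h3, hlim, hrx, hxn, hdvd⟩)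
    · exact ⟨by omega, h3, hlim, by omega, hdvd⟩
    · exact ⟨hodd, h3, hlim, hxn, hdvd⟩
  · rintro ⟨hodd, h3, hlim, hxn, hdvd⟩
    by_cases hxr : x ≤ pyIsqrt n
    · exact Or.inl ⟨h3, hxr, by omega, hdvd, hlim⟩
    · exact Or.inr ⟨hodd, h3, hlim, by omega, hxn, hdvd⟩

theorem alt_pairwise_lt (n lim : Int) (hn : 0 ≤ n) :
    (odd_divisors_up_to_alt n lim).Pairwise (· < ·) := by
  simp only [odd_divisors_up_to_alt]
  rw [List.pairwise_append]
  refine ⟨small_pairwise _ _ _, large_pairwise _ _ hn, fun a ha b hb => ?_⟩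
  have ha' := (small_mem n lim (pyIsqrt n) a).1 ha
  have hb' := (mem_large_iff n lim b hn).1 hb
  omega

-- ===== VERDICT (by name: the statement is the Claim_ definition above) =====
theorem odd_divisors_up_to_spec : Claim_equal_odd_divisors_up_to := by
  intro number limit_value _ hpre
  unfold Spec_odd_divisors_up_to odd_divisors_up_to
  refine PySem.List.sorted_id_eq_of_perm_of_pairwise _ _ ?_ ((alt_pairwise_lt _ _ hpre).imp le_of_lt)
  refine (List.perm_ext_iff_of_nodup
    (List.Pairwise.imp ne_of_lt (alt_pairwise_lt _ _ hpre) : List.Nodup _)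
    (nodup_foldl_stepA _ _ _ _ List.nodup_nil)).2 (fun x => ?_)
  rw [mem_alt_iff _ _ _ hpre, mem_foldl_stepA]
  simp only [List.not_mem_nil, false_or]
  rw [pairing_iff _ _ _ hpre]
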